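-- pv_equiv track=rewrite | github.com/dylantaylor548/kmer-project | utils/abundancy_determination/get_relative_abundance.py | gen_kmerdict
-- ===== SOURCE A (Python) =====
-- def gen_kmerdict(seqdict,oligos):
-- 	kmerdict = {}
-- 	for oligo in oligos:
-- 		seqs = []
-- 		for seq in seqdict:
-- 			sequence = seqdict[seq]
-- 			if oligo in sequence:
-- 				seqs.append(seq)
-- 		kmerdict[oligo] = seqs
-- 	return kmerdict
-- ===== SOURCE B (Python) =====
-- def gen_kmerdict(seqdict, oligos):
--     uniq = list(dict.fromkeys(oligos))
--     lengths = set(len(o) for o in uniq)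
--     hits = {o: [] for o in uniq}
--     for seq, sequence in seqdict.items():
--         n = len(sequence)
--         windows = {L: {sequence[i:i + L] for i in range(n - L + 1)} for L in lengths}
--         for o in uniq:
--             if o in windows[len(o)]:
--                 hits[o].append(seq)
--     return hits
-- ===== Notes on version B (the rewrite author's own statement) =====
-- stated objective: alternative
-- what changed: B inverts the loop nest: it deduplicates the oligos, makes one pass over the sequences, builds for each sequence a set of its length-L windows for every needed oligo length L, and tests each oligo by set membership instead of scanning every sequence with a substring search per oligo (intended as faster; a timing run measured 2.18x at n=4096 but both timed out at n=16384, so the speed claim is unconfirmed).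
import Mathlib
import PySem

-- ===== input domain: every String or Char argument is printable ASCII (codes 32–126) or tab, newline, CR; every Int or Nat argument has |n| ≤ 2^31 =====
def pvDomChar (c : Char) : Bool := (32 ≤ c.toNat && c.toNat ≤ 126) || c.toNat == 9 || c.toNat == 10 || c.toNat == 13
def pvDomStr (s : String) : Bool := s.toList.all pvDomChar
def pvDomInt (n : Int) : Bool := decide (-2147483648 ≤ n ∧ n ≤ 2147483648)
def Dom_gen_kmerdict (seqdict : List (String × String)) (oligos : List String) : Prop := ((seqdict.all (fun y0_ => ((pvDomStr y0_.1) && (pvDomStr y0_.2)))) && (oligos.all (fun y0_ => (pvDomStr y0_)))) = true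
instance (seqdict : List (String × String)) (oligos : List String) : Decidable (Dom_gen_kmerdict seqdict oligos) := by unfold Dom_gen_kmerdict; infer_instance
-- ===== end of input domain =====

-- B inverts the loops: one pass over the sequences, indexing each sequence's length-L windows
-- into a set so every (deduplicated) oligo is tested by set membership instead of a substring
-- scan per oligo (objective: alternative algorithm).

-- ===== PORT A =====
-- 'seqdict[seq]' can never raise here (the key comes from iterating seqdict itself), so the
-- .getD "" default is never used.
def gen_kmerdict (seqdict : List (String × String)) (oligos : List String) : List (String × List String) :=
  (oligos.foldl (fun kmerdict oligo =>
      let seqs := seqdict.foldl (fun seqs kv =>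
          let sequence := (PySem.Dict.mk seqdict).getD kv.1 ""
          if PySem.Str.isIn oligo sequence then seqs ++ [kv.1] else seqs)
        ([] : List String)
      kmerdict.insert oligo seqs)
    (PySem.Dict.empty : PySem.Dict String (List String))).items

-- ===== PORT B =====
-- {sequence[i:i+L] for i in range(len(sequence) - L + 1)}
def pvWin (sequence : String) (L : Int) : PySem.Set String :=
  PySem.Set.ofList ((PySem.List.pyRange 0 (PySem.Str.len sequence - L + 1)).map
    (fun i => PySem.Str.slice sequence (some i) (some (i + L))))

-- the body of B's loop over the sequences: index kv.2's windows per needed length, then test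
-- every oligo by set membership. 'windows[len(o)]' can never raise (len(o) is always a key), so
-- the .getD default is never used; 'hits[o].append(seq)' always finds o, so Dict.modify's
-- default [] is never used either.
def pvStep (uniq : List String) (lengths : PySem.Set Int)
    (hits : PySem.Dict String (List String)) (kv : String × String) :
    PySem.Dict String (List String) :=
  let windows : PySem.Dict Int (PySem.Set String) :=
    lengths.foldl (fun w L => w.insert L (pvWin kv.2 L)) PySem.Dict.empty
  uniq.foldl (fun hits o =>
      if (windows.getD (PySem.Str.len o) PySem.Set.empty).contains o
      then hits.modify o [] (fun v => v ++ [kv.1]) else hits)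
    hits

def gen_kmerdict_alt (seqdict : List (String × String)) (oligos : List String) : List (String × List String) :=
  let uniq := PySem.List.dedup oligos
  let lengths : PySem.Set Int := PySem.Set.ofList (uniq.map PySem.Str.len)
  let hits0 : PySem.Dict String (List String) :=
    uniq.foldl (fun d o => d.insert o []) PySem.Dict.empty
  (seqdict.foldl (pvStep uniq lengths) hits0).items

-- ===== PRECONDITION & SPEC =====
-- Pre_ excludes association lists with duplicate keys: a Python dict argument can never contain
-- them, and on the list representation A's first-match lookup and B's per-entry value would
-- disagree, so the corner is an artefact of the dict encoding.
def Pre_gen_kmerdict (seqdict : List (String × String)) (oligos : List String) : Prop :=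
  (seqdict.map Prod.fst).Nodup

instance (seqdict : List (String × String)) (oligos : List String) : Decidable (Pre_gen_kmerdict seqdict oligos) := by unfold Pre_gen_kmerdict; infer_instance

def pvWitness_gen_kmerdict : (List (String × String)) × List String :=
  ([("s1", "ACGT"), ("s2", "GGA")], ["AC", "GA", "AC", ""])

def Spec_gen_kmerdict (seqdict : List (String × String)) (oligos : List String) (out : List (String × List String)) : Prop := out = gen_kmerdict_alt seqdict oligos
instance (seqdict : List (String × String)) (oligos : List String) (out : List (String × List String)) : Decidable (Spec_gen_kmerdict seqdict oligos out) := by unfold Spec_gen_kmerdict; infer_instance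

-- ===== CLAIM (what is proved, stated in full; the proofs are below) =====
def Claim_equal_gen_kmerdict : Prop := ∀ (seqdict : List (String × String)) (oligos : List String), Dom_gen_kmerdict seqdict oligos → Pre_gen_kmerdict seqdict oligos → Spec_gen_kmerdict seqdict oligos (gen_kmerdict seqdict oligos)

-- ===== LEMMAS AND PROOFS =====

-- the common value: the keys of the seqdict entries whose sequence contains o, in order
def pvF (seqdict : List (String × String)) (o : String) : List String :=
  (seqdict.filter (fun kv => PySem.Str.isIn o kv.2)).map Prod.fst

-- a fold of inserts whose value depends only on the key builds the ordered dedup of the keys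
theorem pv_GI (f : String → List String) (l : List String) :
    (l.foldl (fun d o => d.insert o (f o)) (PySem.Dict.empty : PySem.Dict String (List String))).items
      = (PySem.List.dedup l).map (fun o => (o, f o)) := by
  induction l using List.reverseRecOn with
  | nil => rfl
  | append_singleton l o ih =>
    rw [List.foldl_append, PySem.List.dedup_eq_ofList, PySem.Set.ofList_eq_foldl,
      List.foldl_append]
    rw [← PySem.Set.ofList_eq_foldl, ← PySem.List.dedup_eq_ofList]
    simp only [List.foldl_cons, List.foldl_nil]
    have hkeys : (l.foldl (fun d o => d.insert o (f o)) (PySem.Dict.empty : PySem.Dict String (List String))).keys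
        = PySem.List.dedup l := by
      simp only [PySem.Dict.keys, ih, List.map_map]
      simp [Function.comp_def]
    have hcont : (l.foldl (fun d o => d.insert o (f o)) (PySem.Dict.empty : PySem.Dict String (List String))).contains o
        = decide (o ∈ l) := by
      rw [PySem.Dict.contains_eq_decide_mem_keys, hkeys]
      simp
    by_cases hmem : o ∈ l
    · rw [PySem.Dict.items_insert_of_contains _ _ (by simp [hcont, hmem]), ih]
      have hadd : PySem.Set.add (PySem.List.dedup l) o = PySem.List.dedup l := by
        simp [PySem.Set.add, PySem.List.dedup_eq_ofList, hmem]
      rw [show PySem.Set.add (PySem.List.dedup l) o = PySem.List.dedup l from hadd]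
      rw [List.map_map]
      apply List.map_congr_left
      intro a _
      by_cases ha : a = o <;> simp [ha]
    · rw [PySem.Dict.items_insert_of_not_contains _ _ (by simp [hcont, hmem]), ih]
      have hadd : PySem.Set.add (PySem.List.dedup l) o = PySem.List.dedup l ++ [o] := by
        simp [PySem.Set.add, PySem.List.dedup_eq_ofList, hmem]
      rw [hadd]
      simp

-- A's result, in closed form
theorem pv_A_items (seqdict : List (String × String)) (oligos : List String)
    (h : (seqdict.map Prod.fst).Nodup) :
    gen_kmerdict seqdict oligos = (PySem.List.dedup oligos).map (fun o => (o, pvF seqdict o)) := by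
  unfold gen_kmerdict
  have hfun : (fun (kmerdict : PySem.Dict String (List String)) (oligo : String) =>
      let seqs := seqdict.foldl (fun seqs kv =>
          let sequence := (PySem.Dict.mk seqdict).getD kv.1 ""
          if PySem.Str.isIn oligo sequence then seqs ++ [kv.1] else seqs)
        ([] : List String)
      kmerdict.insert oligo seqs)
      = fun d o => d.insert o (pvF seqdict o) := by
    funext d o
    show d.insert o _ = d.insert o (pvF seqdict o)
    congr 1
    rw [PySem.List.foldl_congr_mem seqdict _
      (fun seqs kv => if PySem.Str.isIn o kv.2 then seqs ++ [kv.1] else seqs) [] ?_]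
    · rw [PySem.List.foldl_append_if]
      simp [pvF]
    · intro acc kv hkv
      show (if PySem.Str.isIn o ((PySem.Dict.mk seqdict).getD kv.1 "") then acc ++ [kv.1] else acc) = _
      rw [PySem.Dict.getD_of_mem_items (PySem.Dict.mk seqdict) (k := kv.1) (v := kv.2)
        (by simpa using hkv) (by simpa [PySem.Dict.keys] using h) ""]
  rw [hfun, pv_GI]

-- getD of a fold of inserts whose value depends only on the key
theorem pv_getD_foldl_insert (l : List Int) (f : Int → PySem.Set String)
    (d : PySem.Dict Int (PySem.Set String)) (k : Int) :
    (l.foldl (fun w a => w.insert a (f a)) d).getD k PySem.Set.empty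
      = if k ∈ l then f k else d.getD k PySem.Set.empty := by
  induction l using List.reverseRecOn with
  | nil => simp
  | append_singleton l a ih =>
    rw [List.foldl_append]
    simp only [List.foldl_cons, List.foldl_nil]
    rw [PySem.Dict.getD_insert]
    by_cases hka : k = a
    · simp [hka]
    · simp only [hka, if_false, ih, List.mem_append, List.mem_singleton, or_false]

-- window-set membership is exactly the substring test, when the window length is len o
theorem pv_mem_win (o s : String) :
    (pvWin s (PySem.Str.len o)).contains o = PySem.Str.isIn o s := by
  rw [Bool.eq_iff_iff, PySem.Set.contains_iff, PySem.Str.isIn_iff_infix]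
  unfold pvWin
  rw [PySem.Set.mem_ofList]
  simp only [List.mem_map]
  constructor
  · rintro ⟨i, hi, heq⟩
    rw [PySem.List.mem_pyRange_one] at hi
    obtain ⟨h0, _⟩ := hi
    lift i to ℕ using h0 with j
    have hTL := congrArg String.toList heq
    rw [PySem.Str.toList_slice] at hTL
    have hcast : ((j : ℤ) + PySem.Str.len o) = ((j + o.toList.length : ℕ) : ℤ) := by
      rw [PySem.Str.len_eq]; push_cast; ring
    rw [hcast, show ∀ (l : List Char) a b, PySem.Chars.slice l a b = PySem.List.slice l a b
      from fun _ _ _ => rfl, PySem.List.slice_natCast] at hTL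
    rw [show j + o.toList.length - j = o.toList.length by omega] at hTL
    rw [List.infix_iff_prefix_suffix]
    exact ⟨s.toList.drop j, by rw [← hTL]; exact List.take_prefix _ _, List.drop_suffix _ _⟩
  · intro hinf
    obtain ⟨pre, suf, hsplit⟩ := hinf
    refine ⟨(pre.length : ℤ), ?_, ?_⟩
    · rw [PySem.List.mem_pyRange_one]
      refine ⟨by positivity, ?_⟩
      rw [PySem.Str.len_eq s, PySem.Str.len_eq o, ← hsplit]
      simp only [List.length_append]
      push_cast
      omega
    · apply String.toList_inj.mp
      rw [PySem.Str.toList_slice]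
      have hcast : ((pre.length : ℤ) + PySem.Str.len o) = ((pre.length + o.toList.length : ℕ) : ℤ) := by
        rw [PySem.Str.len_eq]; push_cast; ring
      rw [hcast, show ∀ (l : List Char) a b, PySem.Chars.slice l a b = PySem.List.slice l a b
        from fun _ _ _ => rfl, PySem.List.slice_natCast]
      rw [show pre.length + o.toList.length - pre.length = o.toList.length by omega]
      rw [← hsplit, List.append_assoc, List.drop_left, List.take_left]

-- keys are unchanged by the inner append loop
theorem pv_B1 (us : List String) (p : String → Bool) (x : String)
    (d : PySem.Dict String (List String)) (hk : ∀ o ∈ us, o ∈ d.keys) :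
    (us.foldl (fun h o => if p o then h.modify o [] (fun v => v ++ [x]) else h) d).keys = d.keys := by
  revert hk
  induction us generalizing d with
  | nil => intro _; rfl
  | cons o t ih =>
    intro hk
    simp only [List.foldl_cons]
    by_cases hp : p o
    · rw [if_pos hp]
      have hkeys : (d.modify o [] (fun v => v ++ [x])).keys = d.keys := by
        rw [PySem.Dict.keys_modify, PySem.Dict.keys_insert_of_contains _ _
          ((PySem.Dict.contains_iff_mem_keys d o).2 (hk o (List.mem_cons_self)))]
      rw [ih _ (fun a ha => by rw [hkeys]; exact hk a (List.mem_cons_of_mem _ ha)), hkeys]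
    · rw [if_neg hp]
      exact ih _ (fun a ha => hk a (List.mem_cons_of_mem _ ha))

-- pointwise effect of the inner append loop
theorem pv_B2 (us : List String) (p : String → Bool) (x : String)
    (d : PySem.Dict String (List String)) (k : String) (hnd : us.Nodup) :
    (us.foldl (fun h o => if p o then h.modify o [] (fun v => v ++ [x]) else h) d).getD k []
      = if k ∈ us ∧ p k then d.getD k [] ++ [x] else d.getD k [] := by
  revert hnd
  induction us generalizing d with
  | nil => intro _; simp
  | cons o t ih =>
    intro hnd
    obtain ⟨hot, hndt⟩ : o ∉ t ∧ t.Nodup := by simpa [List.nodup_cons] using hnd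
    simp only [List.foldl_cons]
    by_cases hp : p o
    · rw [if_pos hp, ih _ hndt, PySem.Dict.getD_modify]
      by_cases hk : k = o
      · subst hk
        simp [hot, hp]
      · simp [hk]
    · rw [if_neg hp, ih _ hndt]
      by_cases hk : k = o
      · subst hk
        simp [hot, hp]
      · simp [hk]

-- items-level effect of the inner append loop
theorem pv_inner_items (us : List String) (hnd : us.Nodup) (p : String → Bool) (x : String)
    (d : PySem.Dict String (List String)) (g : String → List String)
    (hd : d.items = us.map (fun o => (o, g o))) :
    (us.foldl (fun h o => if p o then h.modify o [] (fun v => v ++ [x]) else h) d).items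
      = us.map (fun o => (o, if p o then g o ++ [x] else g o)) := by
  have hkeysd : d.keys = us := by
    simp [PySem.Dict.keys, hd, List.map_map, Function.comp_def]
  have hnk : (us.foldl (fun h o => if p o then h.modify o [] (fun v => v ++ [x]) else h) d).keys = d.keys :=
    pv_B1 us p x d (fun a ha => by rw [hkeysd]; exact ha)
  rw [PySem.Dict.items_eq_map_keys _ (by rw [hnk, hkeysd]; exact hnd) ([] : List String), hnk, hkeysd]
  apply List.map_congr_left
  intro a ha
  rw [pv_B2 us p x d a hnd]
  have hda : d.getD a [] = g a :=
    PySem.Dict.getD_of_mem_items d (by rw [hd]; exact List.mem_map_of_mem ha)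
      (by rw [hkeysd]; exact hnd) []
  simp [ha, hda]

-- the outer loop over the sequences accumulates pvF
theorem pv_outer (oligos : List String) (sd : List (String × String))
    (d : PySem.Dict String (List String)) (g : String → List String)
    (hd : d.items = (PySem.List.dedup oligos).map (fun o => (o, g o))) :
    (sd.foldl (pvStep (PySem.List.dedup oligos)
        (PySem.Set.ofList ((PySem.List.dedup oligos).map PySem.Str.len))) d).items
      = (PySem.List.dedup oligos).map (fun o => (o, g o ++ pvF sd o)) := by
  induction sd generalizing d g with
  | nil =>
    simp only [List.foldl_nil]
    rw [hd]
    simp [pvF]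
  | cons kv t ih =>
    simp only [List.foldl_cons]
    have hrw := PySem.List.foldl_congr_mem (PySem.List.dedup oligos)
      (fun hits o =>
        if (((PySem.Set.ofList ((PySem.List.dedup oligos).map PySem.Str.len)).foldl
              (fun w L => w.insert L (pvWin kv.2 L)) PySem.Dict.empty).getD
              (PySem.Str.len o) PySem.Set.empty).contains o
        then hits.modify o [] (fun v => v ++ [kv.1]) else hits)
      (fun hits o => if PySem.Str.isIn o kv.2 then hits.modify o [] (fun v => v ++ [kv.1]) else hits)
      d
      (fun acc o ho => by
        have hc : (((PySem.Set.ofList ((PySem.List.dedup oligos).map PySem.Str.len)).foldl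
              (fun w L => w.insert L (pvWin kv.2 L)) PySem.Dict.empty).getD
              (PySem.Str.len o) PySem.Set.empty).contains o = PySem.Str.isIn o kv.2 := by
          rw [pv_getD_foldl_insert, if_pos ((PySem.Set.mem_ofList _ _).2 (List.mem_map_of_mem ho)),
            pv_mem_win]
        simp only [hc])
    rw [show pvStep (PySem.List.dedup oligos)
        (PySem.Set.ofList ((PySem.List.dedup oligos).map PySem.Str.len)) d kv
        = (PySem.List.dedup oligos).foldl
            (fun hits o => if PySem.Str.isIn o kv.2
              then hits.modify o [] (fun v => v ++ [kv.1]) else hits) d from hrw,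
      ih _ (fun o => if PySem.Str.isIn o kv.2 then g o ++ [kv.1] else g o)
      (pv_inner_items (PySem.List.dedup oligos) (PySem.List.nodup_dedup oligos) _ kv.1 d g hd)]
    apply List.map_congr_left
    intro a _
    simp only [pvF, List.filter_cons]
    by_cases hin : PySem.Chars.isIn a.toList kv.2.toList
    · simp [hin, PySem.Str.isIn]
    · simp [hin, PySem.Str.isIn]

-- ===== VERDICT (by name: the statement is the Claim_ definition above) =====
theorem gen_kmerdict_spec : Claim_equal_gen_kmerdict := by
  intro seqdict oligos _ hpre
  unfold Spec_gen_kmerdict gen_kmerdict_alt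
  rw [pv_A_items seqdict oligos hpre,
    pv_outer oligos seqdict _ (fun _ => []) (by
      have h := PySem.Dict.items_foldl_insert_fresh (PySem.List.dedup oligos) id
        (fun _ => ([] : List String)) PySem.Dict.empty
        (fun a _ => PySem.Dict.contains_empty a) (by simpa using PySem.List.nodup_dedup oligos)
      simpa using h)]
  simp
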